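-- pv_equiv track=rewrite | github.com/Hansen06/leetcode | Tree/Trie/offer-65_minimumLengthEncoding.py | minimumLengthEncoding1
-- ===== SOURCE A (Python) =====
-- from typing import List
--
-- import collections
-- from functools import reduce
--
-- def minimumLengthEncoding1(words: List[str]) -> int:
--     '''
--     trie树的方法
--     :param words:
--     :return:
--     '''
--     words = list(set(words))  # remove duplicates
--     # Trie is a nested dictionary with nodes created
--     # when fetched entries are missing
--
--     Trie = lambda: collections.defaultdict(Trie)
--     trie = Trie()
--
--     # reduce(..., S, trie) is trie[S[0]][S[1]][S[2]][...][S[S.length - 1]]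
--     nodes = [reduce(dict.__getitem__, word[::-1], trie)
--              for word in words]
--
--     # Add word to the answer if it's node has no neighbors
--     return sum(len(word) + 1
--                for i, word in enumerate(words)
--                if len(nodes[i]) == 0)
-- ===== SOURCE B (Python) =====
-- def minimumLengthEncoding1(words):
--     s = set(words)
--     for word in list(s):
--         for i in range(1, len(word) + 1):
--             s.discard(word[i:])
--     return sum(len(w) + 1 for w in s)
-- ===== Notes on version B (the rewrite author's own statement) =====
-- stated objective: idiomatic
-- what changed: Replaces the nested-defaultdict suffix trie (insert reversed words, count leaf nodes) with a shrinking set of words from which every proper suffix of every word is discarded, then sums len+1 over the survivors.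
import Mathlib
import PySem

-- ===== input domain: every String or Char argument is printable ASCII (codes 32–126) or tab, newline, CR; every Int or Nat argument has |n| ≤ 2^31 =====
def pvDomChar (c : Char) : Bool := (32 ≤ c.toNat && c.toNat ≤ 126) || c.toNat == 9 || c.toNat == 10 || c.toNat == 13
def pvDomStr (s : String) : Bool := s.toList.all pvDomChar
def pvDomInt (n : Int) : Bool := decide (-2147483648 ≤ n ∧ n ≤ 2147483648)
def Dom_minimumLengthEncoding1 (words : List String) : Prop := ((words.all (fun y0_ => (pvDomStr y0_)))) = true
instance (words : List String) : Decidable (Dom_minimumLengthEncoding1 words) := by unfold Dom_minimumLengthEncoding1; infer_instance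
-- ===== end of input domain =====

-- B replaces A's nested-defaultdict trie with a shrinking set of words from which every proper
-- suffix of every word is discarded (objective: idiomatic/alternative, same asymptotic cost).

-- ===== PORT A =====
-- one step of reduce(dict.__getitem__, word[::-1], trie) on a defaultdict trie: descend to (and
-- create) the child node; the trie is encoded by the set of its node paths (exact: a defaultdict
-- trie is determined by the set of paths created in it), the second component is the current path.
def pvStep (st : PySem.Set (List Char) × List Char) (c : Char) : PySem.Set (List Char) × List Char :=
  (PySem.Set.add st.1 (st.2 ++ [c]), st.2 ++ [c])

-- nodes = [reduce(dict.__getitem__, word[::-1], trie) for word in words]: walking word[::-1]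
-- creates every nonempty prefix of word[::-1] as a node path; the root node is the empty path
def pvPaths (words : List String) : PySem.Set (List Char) :=
  (PySem.Set.ofList words).foldl
    (fun s w => (w.toList.reverse.foldl pvStep (s, ([] : List Char))).1)
    (PySem.Set.ofList [([] : List Char)])

def minimumLengthEncoding1 (words : List String) : Int :=
  -- words = list(set(words)); sum(len(word) + 1 for i, word in enumerate(words) if len(nodes[i]) == 0)
  -- len(nodes[i]) == 0  ⇔  no created node path extends word[::-1] by one character
  (PySem.Set.ofList words).foldl
    (fun acc w =>
      if (pvPaths words).any
          (fun p => p.length == w.toList.reverse.length + 1 && w.toList.reverse.isPrefixOf p)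
      then acc
      else acc + (PySem.Str.len w + 1)) 0

-- ===== PORT B =====
-- s = set(words); for word in list(s): for i in range(1, len(word) + 1): s.discard(word[i:])
def pvSurvivors (words : List String) : PySem.Set String :=
  (PySem.Set.ofList words).foldl
    (fun s w =>
      (PySem.List.pyRange 1 (PySem.Str.len w + 1)).foldl
        (fun s i => PySem.Set.discard s (PySem.Str.slice w (some i) none)) s)
    (PySem.Set.ofList words)

def minimumLengthEncoding1_alt (words : List String) : Int :=
  -- return sum(len(w) + 1 for w in s)
  (pvSurvivors words).foldl (fun acc w => acc + (PySem.Str.len w + 1)) 0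

-- ===== PRECONDITION & SPEC =====
def Spec_minimumLengthEncoding1 (words : List String) (out : Int) : Prop := out = minimumLengthEncoding1_alt words
instance (words : List String) (out : Int) : Decidable (Spec_minimumLengthEncoding1 words out) := by unfold Spec_minimumLengthEncoding1; infer_instance

-- ===== CLAIM (what is proved, stated in full; the proofs are below) =====
def Claim_equal_minimumLengthEncoding1 : Prop := ∀ (words : List String), Dom_minimumLengthEncoding1 words → Spec_minimumLengthEncoding1 words (minimumLengthEncoding1 words)

-- ===== LEMMAS AND PROOFS =====

-- membership in the node-path set built by walking one reversed word
theorem pv_mem_step_fold (cs : List Char) (s : PySem.Set (List Char)) (pre : List Char)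
    (q : List Char) :
    q ∈ (cs.foldl pvStep (s, pre)).1 ↔ q ∈ s ∨ ∃ t, t ≠ [] ∧ t <+: cs ∧ q = pre ++ t := by
  induction cs generalizing s pre with
  | nil =>
    simp only [List.foldl_nil]
    constructor
    · exact Or.inl
    · rintro (h | ⟨t, ht, hpre, _⟩)
      · exact h
      · exact absurd (List.prefix_nil.mp hpre) ht
  | cons c cs ih =>
    simp only [List.foldl_cons, pvStep]
    rw [ih]
    constructor
    · rintro (h | ⟨t, ht, hpre, hq⟩)
      · rw [PySem.Set.mem_add] at h
        rcases h with h | h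
        · exact Or.inl h
        · exact Or.inr ⟨[c], by simp, by simp, by simpa using h⟩
      · refine Or.inr ⟨c :: t, by simp, ?_, by simpa using hq⟩
        exact List.cons_prefix_cons.mpr ⟨rfl, hpre⟩
    · rintro (h | ⟨t, ht, hpre, hq⟩)
      · exact Or.inl (by rw [PySem.Set.mem_add]; exact Or.inl h)
      · match t, ht with
        | t0 :: ts, _ =>
          obtain ⟨rfl, hts⟩ := List.cons_prefix_cons.mp hpre
          rcases eq_or_ne ts [] with rfl | hne
          · exact Or.inl (by rw [PySem.Set.mem_add]; exact Or.inr (by simpa using hq))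
          · exact Or.inr ⟨ts, hne, hts, by simpa using hq⟩

-- membership in the full node-path set: the nonempty prefixes of the reversed words (plus the root)
theorem pv_mem_paths_fold (D : List String) (s : PySem.Set (List Char)) (q : List Char) :
    q ∈ D.foldl (fun s w => (w.toList.reverse.foldl pvStep (s, ([] : List Char))).1) s ↔
      q ∈ s ∨ ∃ w ∈ D, q ≠ [] ∧ q <+: w.toList.reverse := by
  induction D generalizing s with
  | nil => simp
  | cons w D ih =>
    simp only [List.foldl_cons]
    rw [ih]
    constructor
    · rintro (h | h)
      · rw [pv_mem_step_fold] at h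
        rcases h with h | ⟨t, ht, hpre, rfl⟩
        · exact Or.inl h
        · exact Or.inr ⟨w, by simp, by simpa using ht, by simpa using hpre⟩
      · obtain ⟨u, hu, hq⟩ := h
        exact Or.inr ⟨u, List.mem_cons_of_mem _ hu, hq⟩
    · rintro (h | ⟨u, hu, hq1, hq2⟩)
      · exact Or.inl (by rw [pv_mem_step_fold]; exact Or.inl h)
      · rcases List.mem_cons.mp hu with rfl | hu
        · exact Or.inl (by rw [pv_mem_step_fold]; exact Or.inr ⟨q, hq1, hq2, by simp⟩)
        · exact Or.inr ⟨u, hu, hq1, hq2⟩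

-- A's childless test ⇔ the reversed word is a proper prefix of some reversed input word
theorem pv_childless (words : List String) (w : String) :
    (pvPaths words).any
        (fun p => p.length == w.toList.reverse.length + 1 && w.toList.reverse.isPrefixOf p) = true ↔
      ∃ u ∈ words, w.toList.reverse <+: u.toList.reverse ∧ w.toList.length < u.toList.length := by
  rw [List.any_eq_true]
  unfold pvPaths
  constructor
  · rintro ⟨p, hp, hcond⟩
    rw [Bool.and_eq_true, beq_iff_eq, List.isPrefixOf_iff_prefix] at hcond
    obtain ⟨hlen, hpre⟩ := hcond
    rw [pv_mem_paths_fold] at hp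
    rcases hp with hp | ⟨u, hu, hne, hpu⟩
    · simp only [PySem.Set.mem_ofList, List.mem_singleton] at hp
      subst hp; simp at hlen
    · rw [PySem.Set.mem_ofList] at hu
      refine ⟨u, hu, hpre.trans hpu, ?_⟩
      have h1 := hpu.length_le
      rw [hlen] at h1
      simp only [List.length_reverse] at h1 ⊢
      omega
  · rintro ⟨u, hu, hpre, hlen⟩
    refine ⟨u.toList.reverse.take (w.toList.reverse.length + 1), ?_, ?_⟩
    · rw [pv_mem_paths_fold]
      refine Or.inr ⟨u, (PySem.Set.mem_ofList words u).mpr hu, ?_, List.take_prefix _ _⟩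
      intro hnil
      have hl := congrArg List.length hnil
      simp only [List.length_take, List.length_reverse, List.length_nil] at hl
      omega
    · rw [Bool.and_eq_true, beq_iff_eq, List.isPrefixOf_iff_prefix]
      refine ⟨?_, List.prefix_take_iff.mpr ⟨hpre, by omega⟩⟩
      rw [List.length_take]
      simp only [List.length_reverse]
      omega

-- a fold of discards is a filter
theorem pv_foldl_discard_eq_filter {α β : Type} [BEq β] [LawfulBEq β] (xs : List α) (f : α → β)
    (s : PySem.Set β) :
    xs.foldl (fun s x => PySem.Set.discard s (f x)) s
      = s.filter (fun v => xs.all (fun x => !(v == f x))) := by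
  induction xs generalizing s with
  | nil => simp
  | cons x xs ih =>
    simp only [List.foldl_cons]
    rw [ih]
    show (PySem.Set.discard s (f x)).filter _ = _
    simp only [PySem.Set.discard]
    rw [List.filter_filter]
    apply List.filter_congr
    intro v _
    simp only [List.all_cons]
    rw [Bool.and_comm]

-- B's whole removal loop is a filter keeping the words that are a proper suffix of no input word
theorem pv_removal_eq_filter (l : List String) (s : PySem.Set String) :
    l.foldl
        (fun s w =>
          (PySem.List.pyRange 1 (PySem.Str.len w + 1)).foldl
            (fun s i => PySem.Set.discard s (PySem.Str.slice w (some i) none)) s) s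
      = s.filter
          (fun v => l.all (fun w => (PySem.List.pyRange 1 (PySem.Str.len w + 1)).all
            (fun i => !(v == PySem.Str.slice w (some i) none)))) := by
  induction l generalizing s with
  | nil => simp
  | cons w l ih =>
    simp only [List.foldl_cons]
    rw [pv_foldl_discard_eq_filter, ih, List.filter_filter]
    apply List.filter_congr
    intro v _
    simp only [List.all_cons]
    rw [Bool.and_comm]

-- 'v is w[i:] for some 1 ≤ i ≤ len(w)'  ⇔  'v is a proper suffix of w'
theorem pv_slice_iff_proper_suffix (v w : String) :
    (∃ i ∈ PySem.List.pyRange 1 (PySem.Str.len w + 1), v = PySem.Str.slice w (some i) none) ↔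
      v.toList.reverse <+: w.toList.reverse ∧ v.toList.length < w.toList.length := by
  constructor
  · rintro ⟨i, hi, rfl⟩
    rw [PySem.List.mem_pyRange_one] at hi
    have hi0 : (0 : Int) ≤ i := by omega
    have hlist : (PySem.Str.slice w (some i) none).toList = w.toList.drop i.toNat := by
      rw [PySem.Str.toList_slice, PySem.Chars.slice_eq_listSlice, PySem.List.slice_from _ hi0]
    have hilen : 1 ≤ i.toNat ∧ i.toNat ≤ w.toList.length := by
      simp only [PySem.Str.len] at hi
      omega
    constructor
    · rw [hlist, List.reverse_prefix]
      exact List.drop_suffix _ _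
    · rw [hlist, List.length_drop]
      omega
  · rintro ⟨hpre, hlen⟩
    rw [List.reverse_prefix] at hpre
    obtain ⟨t, ht⟩ := hpre
    refine ⟨(t.length : Int), ?_, ?_⟩
    · rw [PySem.List.mem_pyRange_one]
      have : t.length + v.toList.length = w.toList.length := by
        rw [← ht]; simp
      simp only [PySem.Str.len]
      omega
    · rw [← String.toList_inj, PySem.Str.toList_slice, PySem.Chars.slice_eq_listSlice,
        PySem.List.slice_from _ (by positivity)]
      simp only [Int.toNat_natCast]
      rw [← ht, List.drop_left]

-- flip A's if-branches so the loop has the shape 'if keep then add else skip'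
theorem pv_flip (words : List String) (acc : Int) (w : String) :
    (if (pvPaths words).any
          (fun p => p.length == w.toList.reverse.length + 1 && w.toList.reverse.isPrefixOf p)
      then acc
      else acc + (PySem.Str.len w + 1)) =
    (if !(pvPaths words).any
          (fun p => p.length == w.toList.reverse.length + 1 && w.toList.reverse.isPrefixOf p)
      then acc + (PySem.Str.len w + 1) else acc) := by
  cases h : (pvPaths words).any
      (fun p => p.length == w.toList.reverse.length + 1 && w.toList.reverse.isPrefixOf p)
  · simp only [Bool.not_false, Bool.false_eq_true, if_false, if_true]
  · simp only [Bool.not_true, Bool.false_eq_true, if_false, if_true]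

-- ===== VERDICT (by name: the statement is the Claim_ definition above) =====
theorem minimumLengthEncoding1_spec : Claim_equal_minimumLengthEncoding1 := by
  intro words _
  show minimumLengthEncoding1 words = minimumLengthEncoding1_alt words
  unfold minimumLengthEncoding1 minimumLengthEncoding1_alt pvSurvivors
  rw [pv_removal_eq_filter]
  rw [PySem.List.foldl_congr_mem _ _
    (fun acc w =>
      if !(pvPaths words).any
          (fun p => p.length == w.toList.reverse.length + 1 && w.toList.reverse.isPrefixOf p)
      then acc + (PySem.Str.len w + 1) else acc) _
    (fun acc w _ => pv_flip words acc w)]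
  rw [PySem.List.foldl_if_eq_foldl_filter
    (p := fun w => !(pvPaths words).any
          (fun p => p.length == w.toList.reverse.length + 1 && w.toList.reverse.isPrefixOf p))
    (f := fun acc w => acc + (PySem.Str.len w + 1))]
  congr 1
  apply List.filter_congr
  intro v hv
  rw [Bool.eq_iff_iff, Bool.not_eq_true', ← Bool.not_eq_true, pv_childless words v]
  simp only [List.all_eq_true, Bool.not_eq_true', beq_eq_false_iff_ne, ne_eq,
    PySem.Set.mem_ofList]
  constructor
  · intro h u hu i hi hvi
    exact h ⟨u, hu, (pv_slice_iff_proper_suffix v u).mp ⟨i, hi, hvi⟩⟩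
  · rintro h ⟨u, hu, hsuf⟩
    obtain ⟨i, hi, hvi⟩ := (pv_slice_iff_proper_suffix v u).mpr hsuf
    exact h u hu i hi hvi
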